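-- pv_equiv track=rewrite | github.com/5555alleksandrs-collab/global-market | parser bot icloud/competitor_price_monitor/google_sheets_sync.py | _build_column_segments
-- ===== SOURCE A (Python) =====
-- from typing import Iterable, List, Optional, Sequence
--
-- def _build_column_segments(
--     column_count: int,
--     preserve_columns: Sequence[int],
-- ) -> List[tuple[int, int]]:
--     preserved = {
--         column
--         for column in preserve_columns
--         if 1 <= column <= column_count
--     }
--     segments: List[tuple[int, int]] = []
--     segment_start: Optional[int] = None
--
--     for column in range(1, column_count + 1):
--         if column in preserved:
--             if segment_start is not None:
--                 segments.append((segment_start, column - 1))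
--                 segment_start = None
--             continue
--         if segment_start is None:
--             segment_start = column
--
--     if segment_start is not None:
--         segments.append((segment_start, column_count))
--
--     return segments
-- ===== SOURCE B (Python) =====
-- def _build_column_segments(column_count, preserve_columns):
--     segments = []
--     prev = 0
--     for p in sorted({c for c in preserve_columns if 1 <= c <= column_count}):
--         if prev + 1 <= p - 1:
--             segments.append((prev + 1, p - 1))
--         prev = p
--     if prev + 1 <= column_count:
--         segments.append((prev + 1, column_count))
--     return segments
-- ===== Notes on version B (the rewrite author's own statement) =====
-- stated objective: alternative
-- what changed: Instead of scanning every column 1..column_count with a segment_start state machine, B sorts the distinct in-range preserved columns and emits the gap between consecutive ones directly; cost depends on the number of preserved columns rather than column_count, though a timing run (preserve lists comparable in size to column_count) did not confirm a measurable speed-up.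
import Mathlib
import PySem

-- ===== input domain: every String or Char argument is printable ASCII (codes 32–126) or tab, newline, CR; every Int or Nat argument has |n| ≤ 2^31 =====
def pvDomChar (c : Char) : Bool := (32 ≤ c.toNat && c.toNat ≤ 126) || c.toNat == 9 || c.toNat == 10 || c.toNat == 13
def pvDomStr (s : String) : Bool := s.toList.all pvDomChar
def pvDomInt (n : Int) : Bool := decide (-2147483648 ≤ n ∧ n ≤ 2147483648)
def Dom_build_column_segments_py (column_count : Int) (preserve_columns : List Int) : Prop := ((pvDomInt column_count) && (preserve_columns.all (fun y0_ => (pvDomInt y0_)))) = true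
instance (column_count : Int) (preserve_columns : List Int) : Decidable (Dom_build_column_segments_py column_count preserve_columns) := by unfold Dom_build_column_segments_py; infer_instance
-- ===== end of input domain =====

-- B replaces A's per-column scan (state machine over range(1, column_count+1)) by sorting the
-- distinct in-range preserved columns and emitting the gaps between consecutive ones (an
-- alternative algorithm; no speed claim).

-- ===== PORT A =====
def build_column_segments_py (column_count : Int) (preserve_columns : List Int) : List (Int × Int) :=
  let preserved : PySem.Set Int :=
    PySem.Set.ofList (preserve_columns.filter (fun column => decide (1 ≤ column ∧ column ≤ column_count)))
  let st := (PySem.List.pyRange 1 (column_count + 1) 1).foldl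
    (fun (st : List (Int × Int) × Option Int) column =>
      if column ∈ preserved then
        match st.2 with
        | some s => (st.1 ++ [(s, column - 1)], none)
        | none => st
      else
        match st.2 with
        | none => (st.1, some column)
        | some _ => st)
    ([], none)
  match st.2 with
  | some s => st.1 ++ [(s, column_count)]
  | none => st.1

-- ===== PORT B =====
def build_column_segments_py_alt (column_count : Int) (preserve_columns : List Int) : List (Int × Int) :=
  let ps := PySem.List.sorted
    (PySem.Set.ofList (preserve_columns.filter (fun c => decide (1 ≤ c ∧ c ≤ column_count))))
    (fun x => x) false
  let st := ps.foldl
    (fun (st : List (Int × Int) × Int) p =>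
      ((if st.2 + 1 ≤ p - 1 then st.1 ++ [(st.2 + 1, p - 1)] else st.1), p))
    ([], 0)
  if st.2 + 1 ≤ column_count then st.1 ++ [(st.2 + 1, column_count)] else st.1

-- ===== PRECONDITION & SPEC =====
def Spec_build_column_segments_py (column_count : Int) (preserve_columns : List Int) (out : List (Int × Int)) : Prop := out = build_column_segments_py_alt column_count preserve_columns
instance (column_count : Int) (preserve_columns : List Int) (out : List (Int × Int)) : Decidable (Spec_build_column_segments_py column_count preserve_columns out) := by unfold Spec_build_column_segments_py; infer_instance

-- ===== CLAIM (what is proved, stated in full; the proofs are below) =====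
def Claim_equal_build_column_segments_py : Prop := ∀ (column_count : Int) (preserve_columns : List Int), Dom_build_column_segments_py column_count preserve_columns → Spec_build_column_segments_py column_count preserve_columns (build_column_segments_py column_count preserve_columns)

-- ===== LEMMAS AND PROOFS =====

-- the list of maximal non-preserved runs in (prev, n], where ps are the preserved columns > prev
def pvGaps (prev : Int) (ps : List Int) (n : Int) : List (Int × Int) :=
  match ps with
  | [] => if prev + 1 ≤ n then [(prev + 1, n)] else []
  | p :: rest => (if prev + 1 ≤ p - 1 then [(prev + 1, p - 1)] else []) ++ pvGaps p rest n

-- same, when A's scan is mid-segment with segment_start = s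
def pvGapsS (s : Int) (ps : List Int) (n : Int) : List (Int × Int) :=
  match ps with
  | [] => [(s, n)]
  | p :: rest => (s, p - 1) :: pvGaps p rest n

def pvRest (start : Option Int) (c : Int) (ps : List Int) (n : Int) : List (Int × Int) :=
  match start with
  | none => pvGaps (c - 1) ps n
  | some s => pvGapsS s ps n

-- B's fold computes pvGaps
theorem pvB_fold (n : Int) : ∀ (ps : List Int) (segs : List (Int × Int)) (prev : Int),
    (let st := ps.foldl
        (fun (st : List (Int × Int) × Int) p =>
          ((if st.2 + 1 ≤ p - 1 then st.1 ++ [(st.2 + 1, p - 1)] else st.1), p))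
        (segs, prev)
     if st.2 + 1 ≤ n then st.1 ++ [(st.2 + 1, n)] else st.1)
    = segs ++ pvGaps prev ps n := by
  intro ps
  induction ps with
  | nil =>
      intro segs prev
      simp only [List.foldl_nil, pvGaps]
      split_ifs <;> simp
  | cons p rest ih =>
      intro segs prev
      simp only [List.foldl_cons, pvGaps]
      rw [ih]
      split_ifs <;> simp

-- A's scan from column c with preserved set P computes pvRest
theorem pvA_loop (P : Int → Prop) [DecidablePred P] (n : Int) : ∀ (k : Nat) (c : Int), n + 1 - c ≤ (k : Int) →
    ∀ (ps : List Int) (segs : List (Int × Int)) (start : Option Int),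
    (∀ x, x ∈ ps ↔ (P x ∧ c ≤ x ∧ x ≤ n)) →
    ps.Pairwise (· < ·) →
    (let st := (PySem.List.pyRange c (n + 1) 1).foldl
        (fun (st : List (Int × Int) × Option Int) column =>
          if P column then
            match st.2 with
            | some s => (st.1 ++ [(s, column - 1)], none)
            | none => st
          else
            match st.2 with
            | none => (st.1, some column)
            | some _ => st)
        (segs, start)
     match st.2 with
     | some s => st.1 ++ [(s, n)]
     | none => st.1)
    = segs ++ pvRest start c ps n := by
  intro k
  induction k with
  | zero =>
      intro c hc ps segs start hps _
      have hcn : n + 1 ≤ c := by omega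
      have hempty : ps = [] := by
        cases ps with
        | nil => rfl
        | cons p r =>
            have := (hps p).1 (List.mem_cons_self ..)
            omega
      subst hempty
      rw [PySem.List.pyRange_one_eq_nil hcn]
      cases start with
      | none =>
          simp [pvRest, pvGaps]
          omega
      | some s => simp [pvRest, pvGapsS]
  | succ k ih =>
      intro c hc ps segs start hps hsort
      by_cases hbig : n + 1 ≤ c
      · have hempty : ps = [] := by
          cases ps with
          | nil => rfl
          | cons p r =>
              have := (hps p).1 (List.mem_cons_self ..)
              omega
        subst hempty
        rw [PySem.List.pyRange_one_eq_nil hbig]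
        cases start with
        | none =>
            simp [pvRest, pvGaps]
            omega
        | some s => simp [pvRest, pvGapsS]
      have hcn : c ≤ n := by omega
      rw [PySem.List.pyRange_one_cons (by omega : c < n + 1), List.foldl_cons]
      by_cases hPc : P c
      · -- c is preserved: ps = c :: rest
        have hcps : c ∈ ps := (hps c).2 ⟨hPc, le_refl c, hcn⟩
        obtain ⟨rest, hcons⟩ : ∃ rest, ps = c :: rest := by
          cases ps with
          | nil => exact absurd hcps (List.not_mem_nil)
          | cons p r =>
              have hhead : p = c := by
                rcases List.mem_cons.1 hcps with h | h
                · omega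
                · have := (List.pairwise_cons.1 hsort).1 c h
                  have hpc := (hps p).1 (List.mem_cons_self ..)
                  omega
              exact ⟨r, by rw [hhead]⟩
        subst hcons
        have hrest : ∀ x, x ∈ rest ↔ (P x ∧ c + 1 ≤ x ∧ x ≤ n) := by
          intro x
          constructor
          · intro hx
            have hxp := (hps x).1 (List.mem_cons_of_mem _ hx)
            have := (List.pairwise_cons.1 hsort).1 x hx
            exact ⟨hxp.1, by omega, hxp.2.2⟩
          · intro hx
            have hxps := (hps x).2 ⟨hx.1, by omega, hx.2.2⟩
            rcases List.mem_cons.1 hxps with h | h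
            · omega
            · exact h
        have hsort' := (List.pairwise_cons.1 hsort).2
        cases start with
        | none =>
            simp only [if_pos hPc]
            rw [ih (c + 1) (by omega) rest segs none hrest hsort']
            simp [pvRest, pvGaps]
        | some s =>
            simp only [if_pos hPc]
            rw [ih (c + 1) (by omega) rest (segs ++ [(s, c - 1)]) none hrest hsort']
            simp [pvRest, pvGapsS]
      · -- c is not preserved
        have hps' : ∀ x, x ∈ ps ↔ (P x ∧ c + 1 ≤ x ∧ x ≤ n) := by
          intro x
          rw [hps x]
          constructor
          · rintro ⟨h1, h2, h3⟩
            refine ⟨h1, ?_, h3⟩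
            rcases lt_or_eq_of_le h2 with h | h
            · omega
            · exact absurd (h ▸ h1) hPc
          · rintro ⟨h1, h2, h3⟩; exact ⟨h1, by omega, h3⟩
        cases start with
        | none =>
            simp only [if_neg hPc]
            rw [ih (c + 1) (by omega) ps segs (some c) hps' hsort]
            simp only [pvRest]
            cases ps with
            | nil => simp [pvGaps, pvGapsS, hcn]
            | cons p r =>
                have hp := (hps' p).1 (List.mem_cons_self ..)
                have hcp : c < p := by omega
                simp [pvGaps, pvGapsS, hcp]
        | some s =>
            simp only [if_neg hPc]
            rw [ih (c + 1) (by omega) ps segs (some s) hps' hsort]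
            rfl

theorem build_column_segments_py_eq_alt (column_count : Int) (preserve_columns : List Int) :
    build_column_segments_py column_count preserve_columns
      = build_column_segments_py_alt column_count preserve_columns := by
  unfold build_column_segments_py build_column_segments_py_alt
  set flt := preserve_columns.filter (fun c => decide (1 ≤ c ∧ c ≤ column_count)) with hflt
  set preserved : PySem.Set Int := PySem.Set.ofList flt with hpre
  set ps := PySem.List.sorted preserved (fun x => x) false with hsorted
  have hmem : ∀ x, x ∈ ps ↔ ((x ∈ preserved) ∧ 1 ≤ x ∧ x ≤ column_count) := by
    intro x
    rw [hsorted, PySem.List.mem_sorted]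
    constructor
    · intro hx
      refine ⟨hx, ?_⟩
      have : x ∈ flt := by rwa [hpre, PySem.Set.mem_ofList] at hx
      have := List.of_mem_filter this
      simpa using this
    · exact fun h => h.1
  have hsort : ps.Pairwise (· < ·) := by
    rw [hsorted, hpre]
    exact PySem.List.sorted_ofList_pairwise_lt flt
  have hA := pvA_loop (fun x => x ∈ preserved) column_count
    column_count.toNat 1 (by omega) ps [] none hmem hsort
  have hB := pvB_fold column_count ps [] 0
  simp only at hA hB
  rw [hA, hB]
  simp [pvRest]

-- ===== VERDICT (by name: the statement is the Claim_ definition above) =====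
theorem build_column_segments_py_spec : Claim_equal_build_column_segments_py := by
  intro column_count preserve_columns _
  exact build_column_segments_py_eq_alt column_count preserve_columns
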